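-- pv_equiv track=rewrite | github.com/IsantePlus/etlscript | test/run_patient_status_arv_comparison.py | _split_result_sets
-- ===== SOURCE A (Python) =====
-- def _split_result_sets(text):
--     """Split mysql batch output into individual result sets.
--
--     MySQL batch mode concatenates result sets with no blank-line separator.
--     Each result set has a header row followed by zero or more data rows, all
--     with the same number of tab-separated columns.  We detect a new result set
--     whenever the column count changes.
--     """
--     result_sets = []
--     current = []          # lines in the current result set
--     current_ncols = None  # column count of the current result set
--
--     for line in text.splitlines():
--         if not line:
--             continue
--         ncols = line.count('\t') + 1
--         if current_ncols is None or ncols != current_ncols: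
--             # New result set starts here
--             if current:
--                 result_sets.append(current)
--             current = [line]
--             current_ncols = ncols
--         else:
--             current.append(line)
--
--     if current:
--         result_sets.append(current)
--
--     return result_sets
-- ===== SOURCE B (Python) =====
-- def _split_result_sets(text):
--     """Split mysql batch output into individual result sets.
--
--     Filter out empty lines once, then scan with two pointers: each maximal
--     run of consecutive lines with the same tab count is sliced out as one
--     result set.
--     """
--     lines = [l for l in text.splitlines() if l]
--     groups = []
--     while lines:
--         k = lines[0].count('\t')
--         n = 1
--         while n < len(lines) and lines[n].count('\t') == k:
--             n += 1
--         groups.append(lines[:n])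
--         lines = lines[n:]
--     return groups
-- ===== Notes on version B (the rewrite author's own statement) =====
-- stated objective: alternative
-- what changed: Replaces the accumulator/flush fold (growing 'current' list plus a current_ncols sentinel with an end-of-loop flush) by a filter-once pass followed by a two-pointer scan that slices out each maximal run of equal tab counts.
import Mathlib
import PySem

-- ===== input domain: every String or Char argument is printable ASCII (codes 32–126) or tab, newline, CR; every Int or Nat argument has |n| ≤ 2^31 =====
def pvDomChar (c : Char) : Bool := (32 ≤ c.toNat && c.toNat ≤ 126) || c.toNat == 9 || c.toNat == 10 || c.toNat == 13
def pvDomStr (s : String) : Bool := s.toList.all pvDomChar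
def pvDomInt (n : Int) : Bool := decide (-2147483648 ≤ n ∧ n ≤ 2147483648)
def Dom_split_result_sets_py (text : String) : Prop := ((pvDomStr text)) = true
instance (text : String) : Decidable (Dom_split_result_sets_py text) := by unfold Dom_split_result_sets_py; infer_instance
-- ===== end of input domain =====

-- B replaces A's accumulator/flush fold by a filter-once pass plus a two-pointer run scan (alternative decomposition, same cost).


-- ===== PORT A =====
-- loop body of A: skip empty lines; on a column-count change flush 'current' and start anew, else append
def pvStepA (s : List (List String) × List String × Option Nat) (line : String) :
    List (List String) × List String × Option Nat :=
  if line == "" then s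
  else
    let ncols := PySem.Str.count line "\t" + 1
    match s.2.2 with
    | none => (if s.2.1 = [] then s.1 else s.1 ++ [s.2.1], [line], some ncols)
    | some k =>
      if ncols ≠ k then (if s.2.1 = [] then s.1 else s.1 ++ [s.2.1], [line], some ncols)
      else (s.1, s.2.1 ++ [line], some k)

-- the end-of-loop flush 'if current: result_sets.append(current)'
def pvFlushA (s : List (List String) × List String × Option Nat) : List (List String) :=
  if s.2.1 = [] then s.1 else s.1 ++ [s.2.1]

def split_result_sets_py (text : String) : List (List String) :=
  pvFlushA ((PySem.Str.splitlines text).foldl pvStepA ([], [], none))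

-- ===== PORT B =====
-- lines[i].count('\t')
def pvKey (l : String) : Nat := PySem.Str.count l "\t"

-- inner while: advance n while lines[n] has tab count k (n < len guard makes getD exact for lines[n])
def pvAltInner (lines : List String) (k : Nat) (n : Nat) : Nat :=
  if h : n < lines.length ∧ pvKey (lines.getD n "") = k then pvAltInner lines k (n + 1) else n
termination_by lines.length - n
decreasing_by omega

theorem pvAltInner_ge (lines : List String) (k n : Nat) : n ≤ pvAltInner lines k n := by
  unfold pvAltInner
  split
  · exact le_trans (Nat.le_succ n) (pvAltInner_ge lines k (n + 1))
  · exact le_refl n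
termination_by lines.length - n
decreasing_by omega

-- outer while: slice off lines[:n] as a group, continue on lines[n:] (take/drop = Python slices for 0 ≤ n)
def pvAltLoop (lines : List String) : List (List String) :=
  match lines with
  | [] => []
  | l :: rest =>
    let n := pvAltInner (l :: rest) (pvKey l) 1
    (l :: rest).take n :: pvAltLoop ((l :: rest).drop n)
termination_by lines.length
decreasing_by
  simp only [List.length_drop]
  have := pvAltInner_ge (l :: rest) (pvKey l) 1
  simp
  omega

def split_result_sets_py_alt (text : String) : List (List String) :=
  pvAltLoop ((PySem.Str.splitlines text).filter (fun l => !(l == "")))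

-- ===== PRECONDITION & SPEC =====
def Spec_split_result_sets_py (text : String) (out : List (List String)) : Prop := out = split_result_sets_py_alt text
instance (text : String) (out : List (List String)) : Decidable (Spec_split_result_sets_py text out) := by unfold Spec_split_result_sets_py; infer_instance

-- ===== CLAIM (what is proved, stated in full; the proofs are below) =====
def Claim_equal_split_result_sets_py : Prop := ∀ (text : String), Dom_split_result_sets_py text → Spec_split_result_sets_py text (split_result_sets_py text)

-- ===== LEMMAS AND PROOFS =====

-- A's loop body ignores empty lines, so folding over the raw lines = folding over the filtered lines
theorem pv_foldl_filter (l : List String) (s : List (List String) × List String × Option Nat) :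
    l.foldl pvStepA s = (l.filter (fun x => !(x == ""))).foldl pvStepA s := by
  induction l generalizing s with
  | nil => rfl
  | cons x xs ih =>
    by_cases hx : x = ""
    · subst hx
      simp [pvStepA, ih]
    · have hb : (x == "") = false := by simpa using hx
      simp [hb, ih]

theorem pvAltInner_eq (lines : List String) (k n : Nat) (h : n ≤ lines.length) :
    pvAltInner lines k n = n + ((lines.drop n).takeWhile (fun y => pvKey y == k)).length := by
  unfold pvAltInner
  split
  · rename_i hc
    obtain ⟨h1, h2⟩ := hc
    rw [pvAltInner_eq lines k (n + 1) h1]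
    have hd : lines.drop n = lines[n] :: lines.drop (n + 1) := (List.getElem_cons_drop h1).symm
    have hg : lines.getD n "" = lines[n] := List.getD_eq_getElem lines "" h1
    rw [hg] at h2
    rw [hd, List.takeWhile_cons]
    simp [h2]
    omega
  · rename_i hc
    by_cases h1 : n < lines.length
    · have h2 : ¬ pvKey (lines.getD n "") = k := fun he => hc ⟨h1, he⟩
      have hd : lines.drop n = lines[n] :: lines.drop (n + 1) := (List.getElem_cons_drop h1).symm
      have hg : lines.getD n "" = lines[n] := List.getD_eq_getElem lines "" h1
      rw [hg] at h2
      rw [hd, List.takeWhile_cons]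
      simp [h2]
    · have : lines.drop n = [] := List.drop_eq_nil_of_le (by omega)
      simp [this]
termination_by lines.length - n
decreasing_by omega

theorem pv_take_takeWhile (p : String → Bool) (xs : List String) :
    xs.take (xs.takeWhile p).length = xs.takeWhile p := by
  induction xs with
  | nil => rfl
  | cons x xs ih =>
    by_cases hp : p x
    · simp [hp, ih]
    · simp [hp]

theorem pv_drop_takeWhile (p : String → Bool) (xs : List String) :
    xs.drop (xs.takeWhile p).length = xs.dropWhile p := by
  induction xs with
  | nil => rfl
  | cons x xs ih =>
    by_cases hp : p x
    · simp [hp, ih]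
    · simp [hp]

theorem pvAltLoop_cons (l : String) (rest : List String) :
    pvAltLoop (l :: rest) =
      (l :: rest.takeWhile (fun y => pvKey y == pvKey l)) ::
        pvAltLoop (rest.dropWhile (fun y => pvKey y == pvKey l)) := by
  rw [pvAltLoop]
  have hn : pvAltInner (l :: rest) (pvKey l) 1
      = 1 + (rest.takeWhile (fun y => pvKey y == pvKey l)).length := by
    rw [pvAltInner_eq (l :: rest) (pvKey l) 1 (by simp)]
    simp
  rw [hn]
  simp [List.take_succ_cons, List.drop_succ_cons, pv_take_takeWhile, pv_drop_takeWhile,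
    Nat.add_comm 1]

-- main invariant: from state (rs, c, some k) with c ≠ [], A's fold+flush appends the rest of the
-- current run to c and then produces exactly B's run groups of the remainder
theorem pv_main (l : List String) (rs : List (List String)) (c : List String) (k : Nat)
    (hc : c ≠ []) (hl : ∀ x ∈ l, ¬ x = "") :
    pvFlushA (l.foldl pvStepA (rs, c, some k)) =
      rs ++ (c ++ l.takeWhile (fun y => pvKey y + 1 == k)) ::
        pvAltLoop (l.dropWhile (fun y => pvKey y + 1 == k)) := by
  induction l generalizing rs c k with
  | nil => simp [pvFlushA, hc, pvAltLoop]
  | cons x xs ih =>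
    have hx : ¬ x = "" := hl x (by simp)
    have hxs : ∀ y ∈ xs, ¬ y = "" := fun y hy => hl y (by simp [hy])
    by_cases hk : PySem.Chars.count x.toList ['\t'] + 1 = k
    · have hstep : pvStepA (rs, c, some k) x = (rs, c ++ [x], some k) := by
        simp [pvStepA, hx, hk]
      rw [List.foldl_cons, hstep, ih rs (c ++ [x]) k (by simp) hxs]
      have hp : (pvKey x + 1 == k) = true := by simp [pvKey, hk]
      simp [hp]
    · have hstep : pvStepA (rs, c, some k) x
          = (rs ++ [c], [x], some (PySem.Chars.count x.toList ['\t'] + 1)) := by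
        simp [pvStepA, hx, hk, hc]
      rw [List.foldl_cons, hstep,
        ih (rs ++ [c]) [x] (PySem.Chars.count x.toList ['\t'] + 1) (by simp) hxs]
      have hp : (pvKey x + 1 == k) = false := by simp [pvKey, hk]
      have hcong : (fun y => pvKey y + 1 == PySem.Chars.count x.toList ['\t'] + 1)
          = (fun y => pvKey y == pvKey x) := by
        funext y; simp [pvKey]
      rw [hcong]
      simp [hp, pvAltLoop_cons]

-- ===== VERDICT (by name: the statement is the Claim_ definition above) =====
theorem split_result_sets_py_spec : Claim_equal_split_result_sets_py := by
  intro text _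
  unfold Spec_split_result_sets_py split_result_sets_py split_result_sets_py_alt
  rw [pv_foldl_filter]
  have hmem : ∀ x ∈ (PySem.Str.splitlines text).filter (fun l => !(l == "")), ¬ x = "" := by
    intro x hx
    simpa using (List.of_mem_filter hx)
  rcases hE : (PySem.Str.splitlines text).filter (fun l => !(l == "")) with _ | ⟨x, xs⟩
  · simp [pvFlushA, pvAltLoop]
  · rw [hE] at hmem
    have hx : ¬ x = "" := hmem x (by simp)
    have hxs : ∀ y ∈ xs, ¬ y = "" := fun y hy => hmem y (by simp [hy])
    have hstep : pvStepA ([], [], none) x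
        = ([], [x], some (PySem.Chars.count x.toList ['\t'] + 1)) := by
      simp [pvStepA, hx]
    rw [List.foldl_cons, hstep,
      pv_main xs [] [x] (PySem.Chars.count x.toList ['\t'] + 1) (by simp) hxs]
    have hcong : (fun y => pvKey y + 1 == PySem.Chars.count x.toList ['\t'] + 1)
        = (fun y => pvKey y == pvKey x) := by
      funext y; simp [pvKey]
    rw [hcong, pvAltLoop_cons]
    simp
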